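-- pv_equiv track=rewrite | github.com/kris0325/CoolDjango | bank_etl/code_1.py | findNumOfPairs
-- ===== SOURCE A (Python) =====
-- def findNumOfPairs(a, b):
--     # Sort arrays in ascending order
--     a.sort()
--     b.sort()
--
--     # Initialize pointers and pair count
--     i = 0  # Pointer for a
--     j = 0  # Pointer for b
--     pairs = 0
--
--     # Iterate while both pointers are within bounds
--     while i < len(a) and j < len(b):
--         if a[i] > b[j]:
--             # Valid pair found
--             pairs += 1
--             i += 1
--             j += 1
--         else:
--             # If a[i] <= b[j], try next a[i]
--             i += 1
--
--     return pairs
-- ===== SOURCE B (Python) =====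
-- def findNumOfPairs(a, b):
--     # Hall-deficiency formula instead of greedy pairing: the maximum number of
--     # pairs equals min(len(b), min over j of (j + #{x in a : x > b[j]})),
--     # with each count obtained by binary search in the sorted a.
--     a.sort()
--     b.sort()
--     n = len(a)
--     best = len(b)
--     for j, y in enumerate(b):
--         lo, hi = 0, n
--         while lo < hi:
--             mid = (lo + hi) // 2
--             if a[mid] <= y:
--                 lo = mid + 1
--             else:
--                 hi = mid
--         best = min(best, j + (n - lo))
--     return best
-- ===== Notes on version B (the rewrite author's own statement) =====
-- stated objective: alternative
-- what changed: Replaces A's greedy two-pointer pairing with the Hall-deficiency closed formula min(len(b), min over j of (j + count of a-elements greater than b[j])), computing each count by binary search in the sorted a; no pairing walk remains.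
import Mathlib
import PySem

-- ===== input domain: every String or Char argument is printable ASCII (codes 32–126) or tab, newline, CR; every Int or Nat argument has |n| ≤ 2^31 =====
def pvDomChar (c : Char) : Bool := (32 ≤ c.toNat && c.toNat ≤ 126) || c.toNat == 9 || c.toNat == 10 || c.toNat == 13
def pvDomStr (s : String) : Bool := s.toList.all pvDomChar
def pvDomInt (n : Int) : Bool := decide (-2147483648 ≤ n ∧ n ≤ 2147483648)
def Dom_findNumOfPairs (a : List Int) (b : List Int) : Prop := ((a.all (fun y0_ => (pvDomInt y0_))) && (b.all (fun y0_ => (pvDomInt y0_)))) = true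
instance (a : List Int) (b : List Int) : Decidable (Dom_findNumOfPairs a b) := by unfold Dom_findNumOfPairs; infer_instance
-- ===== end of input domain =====

-- B replaces A's greedy two-pointer pairing by the Hall-deficiency closed formula
-- min(|b|, min_j (j + #{x ∈ a : x > b[j]})) with counts by binary search
-- (objective: alternative algorithm, same asymptotic cost).
-- Both Pythons sort their arguments in place; the theorems here are about the return value.

-- ===== PORT A =====
-- A's while loop over pointers i (into a) and j (into b), as structural recursion.
def pairLoop : List Int → List Int → Int
  | x :: xs, y :: ys => if x > y then 1 + pairLoop xs ys else pairLoop xs (y :: ys)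
  | _, _ => 0
termination_by a b => a.length + b.length

def findNumOfPairs (a : List Int) (b : List Int) : Int :=
  pairLoop (PySem.List.sorted a (fun x => x) false) (PySem.List.sorted b (fun x => x) false)

-- ===== PORT B =====
-- Source B's inner 'while lo < hi' binary search; a[mid] is always in range (mid < hi ≤ len a),
-- so List.getD is exact for Python's a[mid] here, and Nat division is exact for
-- Python's (lo + hi) // 2 on these nonnegative operands.
def bsearch (a : List Int) (y : Int) (lo hi : Nat) : Nat :=
  if lo < hi then
    if a.getD ((lo + hi) / 2) 0 ≤ y then bsearch a y ((lo + hi) / 2 + 1) hi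
    else bsearch a y lo ((lo + hi) / 2)
  else lo
termination_by hi - lo
decreasing_by
  · have h1 : lo ≤ (lo + hi) / 2 := Nat.le_div_iff_mul_le (by omega) |>.mpr (by omega)
    have h2 : (lo + hi) / 2 < hi := Nat.div_lt_of_lt_mul (by omega)
    omega
  · have h1 : lo ≤ (lo + hi) / 2 := Nat.le_div_iff_mul_le (by omega) |>.mpr (by omega)
    have h2 : (lo + hi) / 2 < hi := Nat.div_lt_of_lt_mul (by omega)
    omega

-- Source B's 'for j, y in enumerate(b)' loop carrying the running minimum 'best'.
def bLoop (a : List Int) : List Int → Int → Int → Int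
  | [], _, best => best
  | y :: ys, j, best =>
      bLoop a ys (j + 1) (min best (j + ((a.length : Int) - (bsearch a y 0 a.length : Int))))

def findNumOfPairs_alt (a : List Int) (b : List Int) : Int :=
  bLoop (PySem.List.sorted a (fun x => x) false)
        (PySem.List.sorted b (fun x => x) false)
        0 (((PySem.List.sorted b (fun x => x) false).length : Int))

-- ===== PRECONDITION & SPEC =====
def Spec_findNumOfPairs (a : List Int) (b : List Int) (out : Int) : Prop := out = findNumOfPairs_alt a b
instance (a : List Int) (b : List Int) (out : Int) : Decidable (Spec_findNumOfPairs a b out) := by unfold Spec_findNumOfPairs; infer_instance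

-- ===== CLAIM (what is proved, stated in full; the proofs are below) =====
def Claim_equal_findNumOfPairs : Prop := ∀ (a : List Int) (b : List Int), Dom_findNumOfPairs a b → Spec_findNumOfPairs a b (findNumOfPairs a b)

-- ===== LEMMAS AND PROOFS =====

-- #{x ∈ a : x > y}
def cnt (a : List Int) (y : Int) : Nat := a.countP (fun z => decide (y < z))

-- abstract form of B's loop, with the binary search replaced by the count it computes
def tmin (a : List Int) : List Int → Int → Int → Int
  | [], _, best => best
  | y :: ys, j, best => tmin a ys (j + 1) (min best (j + (cnt a y : Int)))

theorem countP_le_of_split (a : List Int) (y : Int) :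
    ∀ (lo : Nat), lo ≤ a.length →
    (∀ i, (h : i < a.length) → (a[i] ≤ y ↔ i < lo)) →
    a.countP (fun z => decide (z ≤ y)) = lo := by
  induction a with
  | nil => intro lo h _; simp only [List.countP_nil, List.length_nil] at *; omega
  | cons x xs ih =>
    intro lo hlo hiff
    match lo with
    | 0 =>
      have hx : ¬ x ≤ y := by
        have := hiff 0 (by simp)
        simpa using this
      have : xs.countP (fun z => decide (z ≤ y)) = 0 := by
        apply ih 0 (by omega)
        intro i h
        have := hiff (i + 1) (by simpa using Nat.succ_lt_succ h)
        simpa using this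
      simp [hx, this]
    | l + 1 =>
      have hx : x ≤ y := by
        have := hiff 0 (by simp)
        simpa using this
      have : xs.countP (fun z => decide (z ≤ y)) = l := by
        apply ih l (by simpa using hlo)
        intro i h
        have := hiff (i + 1) (by simpa using Nat.succ_lt_succ h)
        simpa [Nat.succ_lt_succ_iff] using this
      simp [hx, this]

theorem bsearch_correct (a : List Int) (y : Int) (hs : a.Pairwise (· ≤ ·))
    (lo hi : Nat) (h1 : lo ≤ hi) (h2 : hi ≤ a.length)
    (hlo : ∀ i, (h : i < a.length) → i < lo → a[i] ≤ y)
    (hhi : ∀ i, (h : i < a.length) → hi ≤ i → y < a[i]) :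
    bsearch a y lo hi = a.countP (fun z => decide (z ≤ y)) := by
  rw [bsearch]
  have hmono : ∀ p q, (hp : p < a.length) → (hq : q < a.length) → p ≤ q → a[p] ≤ a[q] := by
    intro p q hp hq hpq
    rcases Nat.lt_or_ge p q with h | h
    · exact (List.pairwise_iff_getElem.mp hs) p q hp hq h
    · have : p = q := by omega
      subst this; exact le_refl _
  split
  case isTrue hlt =>
    have hmlo : lo ≤ (lo + hi) / 2 := Nat.le_div_iff_mul_le (by omega) |>.mpr (by omega)
    have hmhi : (lo + hi) / 2 < hi := Nat.div_lt_of_lt_mul (by omega)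
    have hm : (lo + hi) / 2 < a.length := by omega
    have hget : a.getD ((lo + hi) / 2) 0 = a[(lo + hi) / 2] := List.getD_eq_getElem a 0 hm
    rw [hget]
    split
    case isTrue hle =>
      apply bsearch_correct a y hs _ hi (by omega) h2
      · intro i h hi'
        exact le_trans (hmono i ((lo + hi) / 2) h hm (by omega)) hle
      · exact hhi
    case isFalse hgt =>
      apply bsearch_correct a y hs lo _ (by omega) (by omega)
      · exact hlo
      · intro i h hi'
        exact lt_of_lt_of_le (by omega) (hmono ((lo + hi) / 2) i hm h hi')
  case isFalse hge =>
    have hlohi : lo = hi := by omega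
    refine (countP_le_of_split a y lo (by omega) ?_).symm
    intro i h
    constructor
    · intro hle
      by_contra hc
      exact absurd hle (not_le.mpr (hhi i h (by omega)))
    · intro hi'; exact hlo i h hi'
termination_by hi - lo
decreasing_by all_goals omega

theorem cnt_le_length (a : List Int) (y : Int) : cnt a y ≤ a.length :=
  List.countP_le_length

theorem countP_le_add_cnt (a : List Int) (y : Int) :
    a.countP (fun z => decide (z ≤ y)) + cnt a y = a.length := by
  unfold cnt
  induction a with
  | nil => simp
  | cons x xs ih =>
    rcases le_or_gt x y with h | h <;>
      simp [h, not_le.mpr, not_lt.mpr] <;> omega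

theorem bLoop_eq_tmin (a : List Int) (hs : a.Pairwise (· ≤ ·)) :
    ∀ (b : List Int) (j best : Int), bLoop a b j best = tmin a b j best := by
  intro b
  induction b with
  | nil => intro j best; rfl
  | cons y ys ih =>
    intro j best
    have hb : bsearch a y 0 a.length = a.countP (fun z => decide (z ≤ y)) := by
      apply bsearch_correct a y hs 0 a.length (by omega) (by omega)
      · intro i h hi; omega
      · intro i h hi; omega
    have hc := countP_le_add_cnt a y
    have : ((a.length : Int) - (bsearch a y 0 a.length : Int)) = (cnt a y : Int) := by
      rw [hb]; omega
    simp only [bLoop, tmin, this, ih]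

theorem tmin_le (a : List Int) : ∀ (b : List Int) (j best : Int), tmin a b j best ≤ best := by
  intro b
  induction b with
  | nil => intro j best; exact le_refl _
  | cons y ys ih =>
    intro j best
    calc tmin a (y :: ys) j best = tmin a ys (j + 1) (min best (j + (cnt a y : Int))) := rfl
    _ ≤ min best (j + (cnt a y : Int)) := ih _ _
    _ ≤ best := min_le_left _ _

theorem tmin_min (a : List Int) : ∀ (b : List Int) (j s t : Int),
    tmin a b j (min s t) = min s (tmin a b j t) := by
  intro b
  induction b with
  | nil => intro j s t; rfl
  | cons y ys ih =>
    intro j s t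
    show tmin a ys (j + 1) (min (min s t) (j + (cnt a y : Int)))
        = min s (tmin a ys (j + 1) (min t (j + (cnt a y : Int))))
    rw [min_assoc, ih]

theorem tmin_add (a : List Int) : ∀ (b : List Int) (j best c : Int),
    c + tmin a b j best = tmin a b (j + c) (best + c) := by
  intro b
  induction b with
  | nil => intro j best c; show c + best = best + c; omega
  | cons y ys ih =>
    intro j best c
    show c + tmin a ys (j + 1) (min best (j + (cnt a y : Int)))
        = tmin a ys (j + c + 1) (min (best + c) (j + c + (cnt a y : Int)))
    rw [ih]
    have h1 : j + 1 + c = j + c + 1 := by omega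
    have h2 : min best (j + (cnt a y : Int)) + c
        = min (best + c) (j + c + (cnt a y : Int)) := by omega
    rw [h1, h2]

theorem tmin_skip (x : Int) (xs : List Int) : ∀ (b : List Int), (∀ y ∈ b, x ≤ y) →
    ∀ (j best : Int), tmin (x :: xs) b j best = tmin xs b j best := by
  intro b
  induction b with
  | nil => intro _ j best; rfl
  | cons y ys ih =>
    intro hball j best
    have hx : x ≤ y := hball y (by simp)
    have hcnt : cnt (x :: xs) y = cnt xs y := by
      unfold cnt; simp [not_lt.mpr hx]
    show tmin (x :: xs) ys (j + 1) (min best (j + (cnt (x :: xs) y : Int)))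
        = tmin xs ys (j + 1) (min best (j + (cnt xs y : Int)))
    rw [hcnt, ih (fun y' hy' => hball y' (by simp [hy']))]

theorem cnt_all_gt (a : List Int) (y : Int) (h : ∀ z ∈ a, y < z) : cnt a y = a.length := by
  unfold cnt
  rw [List.countP_eq_length]
  intro z hz
  simpa using h z hz

theorem tmin_drop (x : Int) (xs : List Int) (hs : (x :: xs).Pairwise (· ≤ ·)) :
    ∀ (b : List Int) (j best : Int), 1 ≤ j →
    tmin (x :: xs) b j (min best ((xs.length : Int) + 1))
      = min (tmin xs b j best) ((xs.length : Int) + 1) := by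
  intro b
  induction b with
  | nil => intro j best _; simp [tmin]
  | cons y ys ih =>
    intro j best hj
    have htl := List.pairwise_cons.mp hs
    rcases le_or_gt x y with hxy | hyx
    · -- x ≤ y : the head of a contributes to no count
      have hcnt : cnt (x :: xs) y = cnt xs y := by
        unfold cnt; simp [not_lt.mpr hxy]
      show tmin (x :: xs) ys (j + 1) (min (min best ((xs.length : Int) + 1)) (j + (cnt (x :: xs) y : Int)))
          = min (tmin xs ys (j + 1) (min best (j + (cnt xs y : Int)))) ((xs.length : Int) + 1)
      rw [hcnt]
      have hre : min (min best ((xs.length : Int) + 1)) (j + (cnt xs y : Int))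
          = min (min best (j + (cnt xs y : Int))) ((xs.length : Int) + 1) := by omega
      rw [hre, ih (j + 1) (min best (j + (cnt xs y : Int))) (by omega)]
    · -- y < x : every element of a beats y, the term is ≥ j + |a| and is absorbed
      have hcnt : cnt (x :: xs) y = xs.length + 1 := by
        have := cnt_all_gt (x :: xs) y (by
          intro z hz
          rcases List.mem_cons.mp hz with h | h
          · omega
          · have := htl.1 z h; omega)
        simpa using this
      have hcnt' : cnt xs y = xs.length :=
        cnt_all_gt xs y (fun z hz => by have := htl.1 z hz; omega)
      show tmin (x :: xs) ys (j + 1) (min (min best ((xs.length : Int) + 1)) (j + (cnt (x :: xs) y : Int)))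
          = min (tmin xs ys (j + 1) (min best (j + (cnt xs y : Int)))) ((xs.length : Int) + 1)
      rw [hcnt, hcnt']
      have habs : min (min best ((xs.length : Int) + 1)) (j + ((xs.length + 1 : Nat) : Int))
          = min best ((xs.length : Int) + 1) := by push_cast; omega
      rw [habs, ih (j + 1) best (by omega)]
      have hre : min best ((j : Int) + (xs.length : Int)) = min ((j : Int) + (xs.length : Int)) best := min_comm _ _
      rw [hre, tmin_min]
      have hT := tmin_le xs ys (j + 1) best
      omega

theorem pairLoop_eq_tmin : ∀ (a b : List Int),
    a.Pairwise (· ≤ ·) → b.Pairwise (· ≤ ·) →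
    pairLoop a b = tmin a b 0 (b.length : Int) := by
  intro a b
  match a, b with
  | [], b =>
    intro _ _
    match b with
    | [] => simp [pairLoop, tmin]
    | y :: ys =>
      simp only [pairLoop]
      have hcnt : cnt ([] : List Int) y = 0 := rfl
      show 0 = tmin [] ys (0 + 1) (min ((ys.length : Int) + 1) (0 + (cnt ([] : List Int) y : Int)))
      rw [hcnt]
      have : min ((ys.length : Int) + 1) (0 + ((0 : Nat) : Int)) = min ((ys.length : Int) + 1) 0 := by omega
      rw [this]
      -- tmin over an empty a keeps acc ≤ 0 and never drops below it (terms are j ≥ acc)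
      have aux : ∀ (ys : List Int) (j best : Int), 0 ≤ best → best ≤ j → tmin [] ys j best = best := by
        intro ys
        induction ys with
        | nil => intro j best _ _; rfl
        | cons y' ys' ih =>
          intro j best h0 hbj
          show tmin [] ys' (j + 1) (min best (j + (cnt ([] : List Int) y' : Int))) = best
          have hc : cnt ([] : List Int) y' = 0 := rfl
          rw [hc]
          have : min best (j + ((0 : Nat) : Int)) = best := by push_cast; omega
          rw [this]
          exact ih (j + 1) best h0 (by omega)
      rw [aux ys (0 + 1) (min ((ys.length : Int) + 1) 0) (by omega) (by omega)]
      omega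
  | x :: xs, [] => intro _ _; simp [pairLoop, tmin]
  | x :: xs, y :: ys =>
    intro ha hb
    have hatl := List.pairwise_cons.mp ha
    have hbtl := List.pairwise_cons.mp hb
    simp only [pairLoop]
    split
    case isTrue hgt =>
      -- x > y : A pairs them; B's j = 0 term is min(|b|, |a|) and gets absorbed
      have hrec := pairLoop_eq_tmin xs ys hatl.2 hbtl.2
      have hcnt : cnt (x :: xs) y = xs.length + 1 := by
        have := cnt_all_gt (x :: xs) y (by
          intro z hz
          rcases List.mem_cons.mp hz with h | h
          · omega
          · have := hatl.1 z h; omega)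
        simpa using this
      show 1 + pairLoop xs ys
          = tmin (x :: xs) ys (0 + 1) (min ((ys.length : Int) + 1) (0 + (cnt (x :: xs) y : Int)))
      rw [hrec, hcnt]
      have h1 : (1 : Int) + tmin xs ys 0 (ys.length : Int)
          = tmin xs ys 1 ((ys.length : Int) + 1) := by
        rw [tmin_add xs ys 0 (ys.length : Int) 1]
        norm_num
      rw [h1]
      have harg : min ((ys.length : Int) + 1) (0 + ((xs.length + 1 : Nat) : Int))
          = min ((ys.length : Int) + 1) ((xs.length : Int) + 1) := by push_cast; omega
      have h01 : (0 : Int) + 1 = 1 := by norm_num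
      rw [h01, harg]
      rw [tmin_drop x xs ha ys 1 ((ys.length : Int) + 1) (by omega)]
      -- it remains: min (T) (|xs|+1) = T, i.e. T ≤ |xs| + 1
      have hTle : tmin xs ys 1 ((ys.length : Int) + 1) ≤ (xs.length : Int) + 1 := by
        match ys with
        | [] =>
          show (0 : Int) + 1 ≤ (xs.length : Int) + 1
          omega
        | y' :: ys' =>
          show tmin xs ys' (1 + 1) (min ((ys'.length : Int) + 1 + 1) (1 + (cnt xs y' : Int)))
              ≤ (xs.length : Int) + 1
          have hle := tmin_le xs ys' (1 + 1) (min ((ys'.length : Int) + 1 + 1) (1 + (cnt xs y' : Int)))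
          have hcl := cnt_le_length xs y'
          omega
      omega
    case isFalse hle =>
      -- x ≤ y : x beats nothing in b, both sides drop it
      have hrec := pairLoop_eq_tmin xs (y :: ys) hatl.2 hb
      rw [hrec]
      rw [tmin_skip x xs (y :: ys) (by
        intro y' hy'
        rcases List.mem_cons.mp hy' with h | h
        · omega
        · have := hbtl.1 y' h; omega) 0 (((y :: ys).length : Int))]
termination_by a b => a.length + b.length

-- ===== VERDICT (by name: the statement is the Claim_ definition above) =====
theorem findNumOfPairs_spec : Claim_equal_findNumOfPairs := by
  intro a b _
  unfold Spec_findNumOfPairs findNumOfPairs findNumOfPairs_alt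
  rw [bLoop_eq_tmin _ (PySem.List.sorted_pairwise _ _)]
  exact pairLoop_eq_tmin _ _ (PySem.List.sorted_pairwise _ _) (PySem.List.sorted_pairwise _ _)
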